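-- pv_equiv track=rewrite | github.com/OpenMined/syft-nsai-sdk | syft_nsai_sdk/core/pipeline.py | _prepare_enhanced_messages
-- ===== SOURCE A (Python) =====
-- from typing import List, Dict, Any, Optional, Union
--
-- def _prepare_enhanced_messages(original_messages: List[Dict[str, str]], context: str) -> List[Dict[str, str]]:
--     """Prepare messages with search context injected"""
--     if not context.strip():
--         return original_messages
--
--     # Find the last user message and enhance it with context
--     enhanced_messages = []
--     context_injected = False
--
--     for msg in original_messages:
--         if msg.get("role") == "user" and not context_injected:
--             # Inject context before the user's message
--             enhanced_content = f"Context:\n{context}\n\nUser Question: {msg.get('content', '')}"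
--             enhanced_messages.append({
--                 "role": "user",
--                 "content": enhanced_content
--             })
--             context_injected = True
--         else:
--             enhanced_messages.append(msg)
--
--     # If no user message found, add context as system message
--     if not context_injected:
--         enhanced_messages.insert(0, {
--             "role": "system",
--             "content": f"Use this context to answer questions:\n{context}"
--         })
--
--     return enhanced_messages
-- ===== SOURCE B (Python) =====
-- def _inject_context(msgs, context):
--     """Recursively inject context into the first user message; None if there is none."""
--     if not msgs:
--         return None
--     head, tail = msgs[0], msgs[1:]
--     if head.get("role") == "user":
--         return [{
--             "role": "user",
--             "content": f"Context:\n{context}\n\nUser Question: {head.get('content', '')}",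
--         }] + tail
--     rec = _inject_context(tail, context)
--     return None if rec is None else [head] + rec
--
--
-- def _prepare_enhanced_messages(original_messages, context):
--     """Prepare messages with search context injected (recursive Optional-returning helper)."""
--     if not context.strip():
--         return original_messages
--     injected = _inject_context(original_messages, context)
--     if injected is None:
--         return [{
--             "role": "system",
--             "content": f"Use this context to answer questions:\n{context}",
--         }] + original_messages
--     return injected
-- ===== Notes on version B (the rewrite author's own statement) =====
-- stated objective: alternative
-- what changed: Replaces A's iterative rebuild loop carrying a context_injected flag by a structurally recursive helper that returns Optional[list]: the injected list sharing the untouched tail, or None when no user message exists (prepend a system message then).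
import Mathlib
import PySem

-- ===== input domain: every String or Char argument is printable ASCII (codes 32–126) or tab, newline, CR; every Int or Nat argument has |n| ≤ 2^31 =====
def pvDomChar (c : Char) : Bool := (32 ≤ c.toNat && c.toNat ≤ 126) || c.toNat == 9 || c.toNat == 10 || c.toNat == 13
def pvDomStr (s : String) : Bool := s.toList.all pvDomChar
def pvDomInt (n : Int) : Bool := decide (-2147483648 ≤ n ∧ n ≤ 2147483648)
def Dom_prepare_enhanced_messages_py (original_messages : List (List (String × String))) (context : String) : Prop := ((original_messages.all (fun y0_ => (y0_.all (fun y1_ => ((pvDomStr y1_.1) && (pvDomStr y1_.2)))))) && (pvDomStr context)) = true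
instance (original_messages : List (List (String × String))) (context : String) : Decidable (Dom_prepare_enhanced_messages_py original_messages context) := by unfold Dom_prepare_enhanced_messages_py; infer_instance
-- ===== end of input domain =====

-- B replaces A's flagged rebuild loop by a structurally recursive helper returning Option (alternative decomposition, same cost).

-- shared helpers: Python dict.get on an association list (first match), and the two message literals
def pvGet? (m : List (String × String)) (k : String) : Option String :=
  (m.find? (fun p => p.1 == k)).map (·.2)

def pvGetD (m : List (String × String)) (k d : String) : String :=
  (pvGet? m k).getD d

def pvEnh (context : String) (m : List (String × String)) : List (String × String) :=
  [("role", "user"), ("content", "Context:\n" ++ context ++ "\n\nUser Question: " ++ pvGetD m "content" "")]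

def pvSysMsg (context : String) : List (String × String) :=
  [("role", "system"), ("content", "Use this context to answer questions:\n" ++ context)]

-- ===== PORT A =====
-- A's for-loop: accumulate enhanced_messages with a context_injected flag
def pvLoopA (context : String) : List (List (String × String)) → List (List (String × String)) → Bool → List (List (String × String)) × Bool
  | [], enh, injected => (enh, injected)
  | msg :: rest, enh, injected =>
    if pvGet? msg "role" == some "user" && !injected then
      pvLoopA context rest (enh ++ [pvEnh context msg]) true
    else
      pvLoopA context rest (enh ++ [msg]) injected

def prepare_enhanced_messages_py (original_messages : List (List (String × String))) (context : String) : List (List (String × String)) :=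
  if PySem.Str.strip context = "" then original_messages
  else
    let r := pvLoopA context original_messages [] false
    if r.2 = false then pvSysMsg context :: r.1 else r.1

-- ===== PORT B =====
-- B's recursive helper _inject_context: some (list with first user message enhanced), none if no user message
def pvInject (context : String) : List (List (String × String)) → Option (List (List (String × String)))
  | [] => none
  | head :: tail =>
    if pvGet? head "role" == some "user" then
      some (pvEnh context head :: tail)
    else
      match pvInject context tail with
      | none => none
      | some r => some (head :: r)

def prepare_enhanced_messages_py_alt (original_messages : List (List (String × String))) (context : String) : List (List (String × String)) :=
  if PySem.Str.strip context = "" then original_messages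
  else
    match pvInject context original_messages with
    | none => pvSysMsg context :: original_messages
    | some r => r

-- ===== PRECONDITION & SPEC =====
def Spec_prepare_enhanced_messages_py (original_messages : List (List (String × String))) (context : String) (out : List (List (String × String))) : Prop := out = prepare_enhanced_messages_py_alt original_messages context
instance (original_messages : List (List (String × String))) (context : String) (out : List (List (String × String))) : Decidable (Spec_prepare_enhanced_messages_py original_messages context out) := by unfold Spec_prepare_enhanced_messages_py; infer_instance

-- ===== CLAIM (what is proved, stated in full; the proofs are below) =====
def Claim_equal_prepare_enhanced_messages_py : Prop := ∀ (original_messages : List (List (String × String))) (context : String), Dom_prepare_enhanced_messages_py original_messages context → Spec_prepare_enhanced_messages_py original_messages context (prepare_enhanced_messages_py original_messages context)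

-- ===== LEMMAS AND PROOFS =====

theorem pvLoopA_true (context : String) (msgs : List (List (String × String))) :
    ∀ enh, pvLoopA context msgs enh true = (enh ++ msgs, true) := by
  induction msgs with
  | nil => intro enh; simp [pvLoopA]
  | cons msg rest ih =>
    intro enh
    simp [pvLoopA, ih]

theorem pvLoopA_false_inject (context : String) (msgs : List (List (String × String))) :
    ∀ enh, pvLoopA context msgs enh false =
      (match pvInject context msgs with
       | none => (enh ++ msgs, false)
       | some r => (enh ++ r, true)) := by
  induction msgs with
  | nil => intro enh; simp [pvLoopA, pvInject]
  | cons msg rest ih =>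
    intro enh
    by_cases h : pvGet? msg "role" == some "user"
    · simp only [pvLoopA, pvInject, h, Bool.not_false, Bool.and_self, if_pos]
      rw [pvLoopA_true]
      simp
    · have hstep : pvLoopA context (msg :: rest) enh false = pvLoopA context rest (enh ++ [msg]) false := by
        simp [pvLoopA, h]
      rw [hstep, ih]
      simp only [pvInject, h, Bool.false_eq_true, if_false]
      cases hf : pvInject context rest with
      | none => simp
      | some r => simp

-- ===== VERDICT (by name: the statement is the Claim_ definition above) =====
theorem prepare_enhanced_messages_py_spec : Claim_equal_prepare_enhanced_messages_py := by
  intro oms ctx _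
  unfold Spec_prepare_enhanced_messages_py prepare_enhanced_messages_py prepare_enhanced_messages_py_alt
  by_cases hs : PySem.Str.strip ctx = ""
  · simp [hs]
  · simp only [if_neg hs]
    rw [pvLoopA_false_inject ctx oms []]
    cases hf : pvInject ctx oms with
    | none => simp
    | some r => simp
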